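-- pv_equiv track=rewrite | github.com/ignasc/fcc-python-arithmetic-formatter | arithmetic_arranger.py | constructString
-- ===== SOURCE A (Python) =====
-- def constructString(problemList, characterLengthList, answers = False):
--   fullString = ""
--
--   # Construct the first line of arranged problems
--   for index, element in enumerate(problemList):
--     fullString += whiteSpaceWithChar(element[0], characterLengthList[index])
--     if index == len(problemList) - 1:
--       continue# Skip adding white spaces after the last element
--     # Add white spaces at the end of each element, except last one (breaks loop with ifs before)
--     fullString += whiteSpaces()
--
--   # Add a new line character
--   fullString += "\n"
--
--   # Construct the second line of arranged problems
--   for index, element in enumerate(problemList):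
--     fullString += element[1] + " " + whiteSpaceWithChar(element[2], characterLengthList[index] - 2)# -2 to exclude operator spacing as it is added in this line separately
--     if index == len(problemList) - 1:
--       continue# Skip adding white spaces after the last element
--     # Add white spaces at the end of each element, except last one (breaks loop with ifs before)
--     fullString += whiteSpaces()
--
--   # Add a new line character
--   fullString += "\n"
--
--   # Construct the third line of arranged problems (dashes)
--   for index, element in enumerate(problemList):
--     fullString += addDash(characterLengthList[index])
--     if index == len(problemList) - 1:
--       continue# Skip adding white spaces after the last element
--     # Add white spaces at the end of each element, except last one (breaks loop with ifs before)
--     fullString += whiteSpaces()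
--
--   # Construct the fourth line if needed
--   if answers is True:
--     # Add a new line character
--     fullString += "\n"
--     for index, element in enumerate(problemList):
--       fullString += whiteSpaceWithChar(element[3], characterLengthList[index])
--       if index == len(problemList) - 1:
--         continue# Skip adding white spaces after the last element
--       # Add white spaces at the end of each element, except last one (breaks loop with ifs before)
--       fullString += whiteSpaces()
--
--
--   return fullString
--
-- def whiteSpaceWithChar(character, fullLength):
--   string = ""
--   spaceLength = fullLength - len(str(character))
--
--   while spaceLength > 0:
--     string +=" "
--     spaceLength -= 1
--
--   string += str(character)
--   return string
--
-- def whiteSpaces():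
--   return "    "
--
-- def addDash(length):
--   dashes = ""
--   i = length
--   while i > 0:
--     dashes += "-"
--     i -= 1
--   return dashes
-- ===== SOURCE B (Python) =====
-- def constructString(problemList, characterLengthList, answers = False):
--   # One column-major pass: build the four display lines cell-by-cell, then join.
--   ops1, ops2, dashes, results = [], [], [], []
--   for i, p in enumerate(problemList):
--     w = characterLengthList[i]
--     ops1.append(p[0].rjust(w))
--     ops2.append(p[1] + " " + p[2].rjust(w - 2))
--     dashes.append("-" * w)
--     if answers:
--       results.append(p[3].rjust(w))
--   lines = ["    ".join(ops1), "    ".join(ops2), "    ".join(dashes)]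
--   if answers:
--     lines.append("    ".join(results))
--   return "\n".join(lines)
-- ===== Notes on version B (the rewrite author's own statement) =====
-- stated objective: faster
-- what changed: B makes one column-major pass that computes the four cell strings per problem with rjust/'-'*w and joins them with ' '.join and '\n'.join, replacing A's four row-building enumerate loops that grow one string via += with character-at-a-time while-loops for padding and dashes.
import Mathlib
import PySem

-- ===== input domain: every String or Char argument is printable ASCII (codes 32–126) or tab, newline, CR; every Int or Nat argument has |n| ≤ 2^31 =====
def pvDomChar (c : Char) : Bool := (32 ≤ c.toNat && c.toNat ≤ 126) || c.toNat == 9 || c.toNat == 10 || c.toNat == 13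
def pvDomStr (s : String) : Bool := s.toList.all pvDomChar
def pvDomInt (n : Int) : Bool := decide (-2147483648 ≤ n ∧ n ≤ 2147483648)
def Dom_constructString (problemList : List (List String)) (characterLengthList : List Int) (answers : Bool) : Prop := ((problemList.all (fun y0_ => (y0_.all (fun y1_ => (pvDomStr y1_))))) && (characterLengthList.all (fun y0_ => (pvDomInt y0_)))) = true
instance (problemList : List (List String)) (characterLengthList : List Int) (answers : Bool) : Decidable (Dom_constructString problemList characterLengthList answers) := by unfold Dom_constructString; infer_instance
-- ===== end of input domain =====

-- B rebuilds the display column-major in one pass (four cell lists, joined at the end)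
-- instead of A's four row-building loops with hand-rolled space/dash while-loops; return
-- value proved equal on Pre_ (indices in range), no mutation involved.

-- ===== PORT A =====
-- while spaceLength > 0: string += " "  (iterates max(spaceLength,0) times)
def pvPadLoop : Nat → String → String
  | 0, s => s
  | n+1, s => pvPadLoop n (s ++ " ")

-- whiteSpaceWithChar(character, fullLength); str(character) is the identity on str
def whiteSpaceWithCharA (character : String) (fullLength : Int) : String :=
  pvPadLoop (fullLength - (PySem.Str.len character : Int)).toNat "" ++ character

def whiteSpacesA : String := "    "

-- while i > 0: dashes += "-"
def pvDashLoop : Nat → String → String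
  | 0, s => s
  | n+1, s => pvDashLoop n (s ++ "-")

def addDashA (length : Int) : String := pvDashLoop length.toNat ""

-- one 'for index, element in enumerate(problemList)' line-building loop of A;
-- all four loops have this exact shape, differing only in the cell expression
def pvLineLoop (cell : Int → List String → String) (n : Int) :
    List (Int × List String) → String → String
  | [], acc => acc
  | (i, e) :: rest, acc =>
      if i = n - 1 then pvLineLoop cell n rest (acc ++ cell i e)
      else pvLineLoop cell n rest (acc ++ cell i e ++ whiteSpacesA)

-- element[k] / characterLengthList[index] ported with pyGetD; Pre_ keeps every index in range
def constructString (problemList : List (List String)) (characterLengthList : List Int) (answers : Bool) : String :=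
  let n : Int := problemList.length
  let en := PySem.List.enumerate problemList 0
  let s1 := pvLineLoop
    (fun i e => whiteSpaceWithCharA (PySem.List.pyGetD e 0 "") (PySem.List.pyGetD characterLengthList i 0))
    n en ""
  let s2 := pvLineLoop
    (fun i e => (PySem.List.pyGetD e 1 "") ++ " " ++
      whiteSpaceWithCharA (PySem.List.pyGetD e 2 "") (PySem.List.pyGetD characterLengthList i 0 - 2))
    n en (s1 ++ "\n")
  let s3 := pvLineLoop
    (fun i _ => addDashA (PySem.List.pyGetD characterLengthList i 0))
    n en (s2 ++ "\n")
  if answers = true then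
    pvLineLoop
      (fun i e => whiteSpaceWithCharA (PySem.List.pyGetD e 3 "") (PySem.List.pyGetD characterLengthList i 0))
      n en (s3 ++ "\n")
  else s3

-- ===== PORT B =====
-- s.rjust(w)
def pvRjust (s : String) (w : Int) : String :=
  String.ofList (List.replicate (w - (PySem.Str.len s : Int)).toNat ' ') ++ s

-- "-" * w
def pvDashes (w : Int) : String := String.ofList (List.replicate w.toNat '-')

-- B's single loop: append one cell per line-list for each problem
def pvCellsLoop (cl : List Int) (answers : Bool) :
    List (Int × List String) →
    List String × List String × List String × List String →
    List String × List String × List String × List String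
  | [], st => st
  | (i, p) :: rest, (l1, l2, l3, l4) =>
      let w := PySem.List.pyGetD cl i 0
      pvCellsLoop cl answers rest
        (l1 ++ [pvRjust (PySem.List.pyGetD p 0 "") w],
         l2 ++ [(PySem.List.pyGetD p 1 "") ++ " " ++ pvRjust (PySem.List.pyGetD p 2 "") (w - 2)],
         l3 ++ [pvDashes w],
         if answers then l4 ++ [pvRjust (PySem.List.pyGetD p 3 "") w] else l4)

def constructString_alt (problemList : List (List String)) (characterLengthList : List Int) (answers : Bool) : String :=
  let st := pvCellsLoop characterLengthList answers (PySem.List.enumerate problemList 0) ([], [], [], [])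
  let lines := [PySem.Str.join "    " st.1, PySem.Str.join "    " st.2.1, PySem.Str.join "    " st.2.2.1]
  let lines := if answers then lines ++ [PySem.Str.join "    " st.2.2.2] else lines
  PySem.Str.join "\n" lines

-- ===== PRECONDITION & SPEC =====
-- A raises IndexError when characterLengthList is shorter than problemList or a problem
-- has fewer than 3 entries (4 when answers is true); exactly those inputs are excluded.
def Pre_constructString (problemList : List (List String)) (characterLengthList : List Int) (answers : Bool) : Prop :=
  problemList.length ≤ characterLengthList.length ∧
  ∀ p ∈ problemList, (if answers then 4 else 3) ≤ p.length
instance (problemList : List (List String)) (characterLengthList : List Int) (answers : Bool) : Decidable (Pre_constructString problemList characterLengthList answers) := by unfold Pre_constructString; infer_instance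

def pvWitness_constructString : List (List String) × List Int × Bool :=
  ([["32", "+", "8", "40"], ["1", "-", "3801", "-3800"]], [4, 6], true)

def Spec_constructString (problemList : List (List String)) (characterLengthList : List Int) (answers : Bool) (out : String) : Prop := out = constructString_alt problemList characterLengthList answers
instance (problemList : List (List String)) (characterLengthList : List Int) (answers : Bool) (out : String) : Decidable (Spec_constructString problemList characterLengthList answers out) := by unfold Spec_constructString; infer_instance

-- ===== CLAIM (what is proved, stated in full; the proofs are below) =====
def Claim_equal_constructString : Prop := ∀ (problemList : List (List String)) (characterLengthList : List Int) (answers : Bool), Dom_constructString problemList characterLengthList answers → Pre_constructString problemList characterLengthList answers → Spec_constructString problemList characterLengthList answers (constructString problemList characterLengthList answers)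

-- ===== LEMMAS AND PROOFS =====

theorem pvPadLoop_eq (n : Nat) (s : String) :
    pvPadLoop n s = s ++ String.ofList (List.replicate n ' ') := by
  induction n generalizing s with
  | zero => simp [pvPadLoop]
  | succ n ih =>
      apply String.toList_inj.mp
      simp [pvPadLoop, ih, List.replicate_succ]

theorem pvDashLoop_eq (n : Nat) (s : String) :
    pvDashLoop n s = s ++ String.ofList (List.replicate n '-') := by
  induction n generalizing s with
  | zero => simp [pvDashLoop]
  | succ n ih =>
      apply String.toList_inj.mp
      simp [pvDashLoop, ih, List.replicate_succ]

theorem whiteSpaceWithCharA_eq_rjust (c : String) (w : Int) :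
    whiteSpaceWithCharA c w = pvRjust c w := by
  apply String.toList_inj.mp
  simp [whiteSpaceWithCharA, pvRjust, pvPadLoop_eq]

theorem addDashA_eq_dashes (w : Int) : addDashA w = pvDashes w := by
  apply String.toList_inj.mp
  simp [addDashA, pvDashes, pvDashLoop_eq]

-- A's line loop over enumerate xs j (with j + |xs| = total length n) is sep-join of the cells
theorem pvLineLoop_eq_join (cell : Int → List String → String) (n : Int)
    (xs : List (List String)) (j : Int) (acc : String) (h : j + xs.length = n) :
    pvLineLoop cell n (PySem.List.enumerate xs j) acc
      = acc ++ PySem.Str.join "    "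
          ((PySem.List.enumerate xs j).map (fun p => cell p.1 p.2)) := by
  induction xs generalizing j acc with
  | nil =>
      apply String.toList_inj.mp
      simp [PySem.List.enumerate, pvLineLoop, PySem.Str.toList_join, PySem.Chars.join_nil]
  | cons p ps ih =>
      rw [PySem.List.enumerate_cons]
      by_cases hj : j = n - 1
      · have hps : ps = [] := by
          have := h
          simp at this
          have : ps.length = 0 := by omega
          exact List.length_eq_zero_iff.mp this
        subst hps
        apply String.toList_inj.mp
        simp [pvLineLoop, hj, PySem.List.enumerate, PySem.Str.toList_join,
          PySem.Chars.join_singleton]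
      · have hps : ps ≠ [] := by
          intro hnil
          subst hnil
          simp at h
          omega
      -- unfold one step, apply ih at j+1
        have h' : (j + 1) + ps.length = n := by simp at h ⊢; omega
        rw [pvLineLoop, if_neg hj, ih (j + 1) _ h']
        obtain ⟨q, qs, hq⟩ := List.exists_cons_of_ne_nil hps
        subst hq
        apply String.toList_inj.mp
        rw [PySem.List.enumerate_cons]
        simp [PySem.Str.toList_join, PySem.Chars.join_cons_cons, whiteSpacesA]

-- B's loop appends the four mapped cell lists
theorem pvCellsLoop_eq_map (cl : List Int) (answers : Bool)
    (xs : List (Int × List String)) (l1 l2 l3 l4 : List String) :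
    pvCellsLoop cl answers xs (l1, l2, l3, l4) =
      (l1 ++ xs.map (fun p => pvRjust (PySem.List.pyGetD p.2 0 "") (PySem.List.pyGetD cl p.1 0)),
       l2 ++ xs.map (fun p => (PySem.List.pyGetD p.2 1 "") ++ " " ++
               pvRjust (PySem.List.pyGetD p.2 2 "") (PySem.List.pyGetD cl p.1 0 - 2)),
       l3 ++ xs.map (fun p => pvDashes (PySem.List.pyGetD cl p.1 0)),
       if answers then
         l4 ++ xs.map (fun p => pvRjust (PySem.List.pyGetD p.2 3 "") (PySem.List.pyGetD cl p.1 0))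
       else l4) := by
  induction xs generalizing l1 l2 l3 l4 with
  | nil => cases answers <;> simp [pvCellsLoop]
  | cons p ps ih =>
      obtain ⟨i, e⟩ := p
      cases answers <;> simp [pvCellsLoop, ih]

-- ===== VERDICT (by name: the statement is the Claim_ definition above) =====
theorem constructString_spec : Claim_equal_constructString := by
  intro pl cl answers _ _
  unfold Spec_constructString
  simp only [constructString, constructString_alt]
  rw [pvCellsLoop_eq_map]
  have hlen : (0 : Int) + pl.length = (pl.length : Int) := by omega
  cases answers with
  | false =>
      rw [pvLineLoop_eq_join _ _ _ _ _ hlen, pvLineLoop_eq_join _ _ _ _ _ hlen,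
          pvLineLoop_eq_join _ _ _ _ _ hlen, pvLineLoop_eq_join _ _ _ _ _ hlen]
      simp only [whiteSpaceWithCharA_eq_rjust, addDashA_eq_dashes]
      apply String.toList_inj.mp
      simp [PySem.Str.toList_join, PySem.Chars.join_cons_cons, PySem.Chars.join_singleton,
        List.map_map]
  | true =>
      rw [pvLineLoop_eq_join _ _ _ _ _ hlen, pvLineLoop_eq_join _ _ _ _ _ hlen,
          pvLineLoop_eq_join _ _ _ _ _ hlen, pvLineLoop_eq_join _ _ _ _ _ hlen]
      simp only [whiteSpaceWithCharA_eq_rjust, addDashA_eq_dashes]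
      apply String.toList_inj.mp
      simp [PySem.Str.toList_join, PySem.Chars.join_cons_cons, PySem.Chars.join_singleton,
        List.map_map]
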